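-- pv_equiv track=rewrite | github.com/cornell-ece5745/ece5745-tapeout | project-group16/sim/lab2_xcel/SortUnitFL.py | sort_blocks
-- ===== SOURCE A (Python) =====
-- def sort_blocks(arr):
--   def sort( a, l, r ):
--     i, j = l, r;
--     x = a[ (l+r) >> 1 ]
--     while i <= j:
--       while a[i] < x: i += 1
--       while a[j] > x: j -= 1
--       if i <= j:
--         a[i], a[j] = a[j], a[i]
--         i += 1
--         j -= 1
--     if l < j: sort( a, l, j )
--     if i < r: sort( a, i, r )
--   ret = arr[::]
--   if len(arr) < 8:
--     sort( ret, 0, len(ret)-1 )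
--     return ret
--   else:
--     k = len(arr)//8
--     idx = 0
--     for i in range(k):
--       sort(ret,idx,idx+7)
--       idx+=8
--     sort(ret,idx,len(arr)-1)
--   if len(arr) % 8 == 0:
--     return ret
--   else:
--     return ret[0:idx] + [0]*(8-(len(arr)-idx)) + ret[idx:]
-- ===== SOURCE B (Python) =====
-- def sort_blocks(arr):
--   def insert(x, block):
--     if block and block[0] <= x:
--       return [block[0]] + insert(x, block[1:])
--     return [x] + block
--   out = []
--   block = []
--   for x in arr:
--     block = insert(x, block)
--     if len(block) == 8:
--       out.extend(block)
--       block = []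
--   if not block:
--     return out
--   if not out:
--     return block
--   return out + [0] * (8 - len(block)) + block
-- ===== Notes on version B (the rewrite author's own statement) =====
-- stated objective: alternative
-- what changed: Replaces the copy-then-in-place recursive Hoare quicksort driven by index arithmetic over 8-element ranges with a single streaming pass: each element is inserted into a small sorted buffer (insertion sort), which is flushed to the output whenever it reaches 8 elements; padding/tail handling falls out of the final buffer state.
import Mathlib
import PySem

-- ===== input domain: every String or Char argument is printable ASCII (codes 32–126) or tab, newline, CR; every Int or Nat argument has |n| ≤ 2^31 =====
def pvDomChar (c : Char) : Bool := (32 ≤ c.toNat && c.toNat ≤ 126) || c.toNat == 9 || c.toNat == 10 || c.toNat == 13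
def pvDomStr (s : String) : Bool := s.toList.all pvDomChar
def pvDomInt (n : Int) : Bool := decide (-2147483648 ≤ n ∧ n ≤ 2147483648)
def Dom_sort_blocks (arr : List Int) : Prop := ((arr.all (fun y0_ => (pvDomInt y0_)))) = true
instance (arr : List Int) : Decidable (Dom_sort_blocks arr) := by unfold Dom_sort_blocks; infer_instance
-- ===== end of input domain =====

-- B replaces A's copy + in-place recursive Hoare quicksort over 8-element index ranges by a
-- single streaming pass that inserts each element into a small sorted buffer and flushes the
-- buffer to the output whenever it reaches 8 elements (objective: alternative).

-- ===== PORT A =====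
-- `a[i], a[j] = a[j], a[i]` (both right-hand sides read first, then stored); indices are proved
-- in range in the lemmas below, so the `toNat`/`getD` reads are exact for this program.
def sbSwap (a : List Int) (i j : Int) : List Int :=
  (a.set i.toNat (PySem.List.pyGetD a j 0)).set j.toNat (PySem.List.pyGetD a i 0)

-- A's inner `while a[i] < x: i += 1` (the fuel only bounds the scan; proved sufficient below)
def sbScanUp (a : List Int) (x : Int) : Int → Nat → Int
  | i, 0 => i
  | i, f+1 => if PySem.List.pyGetD a i 0 < x then sbScanUp a x (i+1) f else i


-- A's inner `while a[j] > x: j -= 1`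
def sbScanDown (a : List Int) (x : Int) : Int → Nat → Int
  | j, 0 => j
  | j, f+1 => if x < PySem.List.pyGetD a j 0 then sbScanDown a x (j-1) f else j


-- A's outer `while i <= j` partition loop; returns the list and the final i, j
def sbLoop (a : List Int) (x : Int) : Int → Int → Nat → List Int × Int × Int
  | i, j, 0 => (a, i, j)
  | i, j, f+1 =>
    if i ≤ j then
      let i' := sbScanUp a x i (a.length + 1)
      let j' := sbScanDown a x j (a.length + 1)
      if i' ≤ j' then
        sbLoop (sbSwap a i' j') x (i' + 1) (j' - 1) f
      else (a, i', j')
    else (a, i, j)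


-- A's recursive `sort(a, l, r)`; `(l+r) >> 1` is floor division by 2 (exact for Python ints);
-- the fuel bounds the recursion depth and is proved sufficient below
def sbSort (a : List Int) (l r : Int) : Nat → List Int
  | 0 => a
  | f+1 =>
    let x := PySem.List.pyGetD a (PySem.Int.floordiv (l + r) 2) 0
    let t := sbLoop a x l r (a.length + 2)
    let a1 := t.1
    let i := t.2.1
    let j := t.2.2
    let a2 := if l < j then sbSort a1 l j f else a1
    if i < r then sbSort a2 i r f else a2


def sort_blocks (arr : List Int) : List Int :=
  let ret := PySem.List.slice arr none none
  if (arr.length : Int) < 8 then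
    sbSort ret 0 ((ret.length : Int) - 1) (ret.length + 1)
  else
    let k := PySem.Int.floordiv (arr.length : Int) 8
    let st := (PySem.List.pyRange 0 k 1).foldl
      (fun (st : List Int × Int) _ =>
        (sbSort st.1 st.2 (st.2 + 7) (st.1.length + 1), st.2 + 8))
      (ret, 0)
    let ret := sbSort st.1 st.2 ((arr.length : Int) - 1) (st.1.length + 1)
    let idx := st.2
    if PySem.Int.mod (arr.length : Int) 8 == 0 then ret
    else PySem.List.slice ret (some 0) (some idx)
         ++ List.replicate (8 - ((arr.length : Int) - idx)).toNat 0
         ++ PySem.List.slice ret (some idx) none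

-- ===== PORT B =====
-- Source B's recursive helper `insert(x, block)`
def sbInsert (x : Int) : List Int → List Int
  | [] => [x]
  | b :: t => if b ≤ x then b :: sbInsert x t else x :: b :: t

-- the body of Source B's `for x in arr` loop over the state (out, block)
def sbStep (st : List Int × List Int) (x : Int) : List Int × List Int :=
  let block := sbInsert x st.2
  if block.length == 8 then (st.1 ++ block, []) else (st.1, block)

def sort_blocks_alt (arr : List Int) : List Int :=
  let st := arr.foldl sbStep ([], [])
  if st.2 = [] then st.1
  else if st.1 = [] then st.2
  else st.1 ++ List.replicate (8 - st.2.length) 0 ++ st.2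

-- ===== PRECONDITION & SPEC =====
-- Pre_ excludes only the empty list, on which A's quicksort indexes into the empty copy and raises IndexError (B would return []).
def Pre_sort_blocks (arr : List Int) : Prop := arr ≠ []
instance (arr : List Int) : Decidable (Pre_sort_blocks arr) := by unfold Pre_sort_blocks; infer_instance
def pvWitness_sort_blocks : List Int := [5, 1, 4]

def Spec_sort_blocks (arr : List Int) (out : List Int) : Prop := out = sort_blocks_alt arr
instance (arr : List Int) (out : List Int) : Decidable (Spec_sort_blocks arr out) := by unfold Spec_sort_blocks; infer_instance

-- ===== CLAIM (what is proved, stated in full; the proofs are below) =====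
def Claim_equal_sort_blocks : Prop := ∀ (arr : List Int), Dom_sort_blocks arr → Pre_sort_blocks arr → Spec_sort_blocks arr (sort_blocks arr)

-- ===== LEMMAS AND PROOFS =====

def sbGet (a : List Int) (k : Int) : Int := PySem.List.pyGetD a k 0

lemma length_sbSwap (a : List Int) (i j : Int) : (sbSwap a i j).length = a.length := by
  simp [sbSwap]

lemma sbSwap_perm (a : List Int) (i j : Int) (hi : 0 ≤ i) (hj : 0 ≤ j)
    (hi' : i < (a.length : Int)) (hj' : j < (a.length : Int)) : (sbSwap a i j).Perm a := by
  have h1 : i.toNat < a.length := by omega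
  have h2 : j.toNat < a.length := by omega
  unfold sbSwap
  rw [PySem.List.pyGetD_eq_getElem a 0 hj (by omega), PySem.List.pyGetD_eq_getElem a 0 hi (by omega)]
  exact List.set_set_perm h1 h2

lemma sbSwap_get_ne (a : List Int) (i j k : Int) (hk : 0 ≤ k) (hk' : k < (a.length : Int))
    (hki : k ≠ i) (hkj : k ≠ j) (hi : 0 ≤ i) (hj : 0 ≤ j) :
    sbGet (sbSwap a i j) k = sbGet a k := by
  unfold sbGet sbSwap
  rw [PySem.List.pyGetD_eq_getElem _ 0 hk (by simp; omega),
      PySem.List.pyGetD_eq_getElem a 0 hk hk']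
  rw [List.getElem_set_ne (by omega), List.getElem_set_ne (by omega)]

lemma sbSwap_get_i (a : List Int) (i j : Int) (hi : 0 ≤ i) (hij : i ≤ j)
    (hj' : j < (a.length : Int)) : sbGet (sbSwap a i j) i = sbGet a j := by
  unfold sbGet sbSwap
  rw [PySem.List.pyGetD_eq_getElem _ 0 hi (by simp; omega)]
  by_cases h : i = j
  · subst h
    rw [List.getElem_set_self (by simp; omega)]
  · rw [List.getElem_set_ne (by omega), List.getElem_set_self (by simp; omega)]

lemma sbSwap_get_j (a : List Int) (i j : Int) (hi : 0 ≤ i) (hij : i ≤ j)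
    (hj' : j < (a.length : Int)) : sbGet (sbSwap a i j) j = sbGet a i := by
  unfold sbGet sbSwap
  rw [PySem.List.pyGetD_eq_getElem _ 0 (by omega) (by simp; omega)]
  rw [List.getElem_set_self (by simp; omega)]

lemma sbScanUp_spec (a : List Int) (x : Int) (i p : Int) (f : Nat)
    (hip : i ≤ p) (hp : ¬ sbGet a p < x) (hf : (p - i).toNat < f) :
    i ≤ sbScanUp a x i f ∧ sbScanUp a x i f ≤ p ∧ ¬ sbGet a (sbScanUp a x i f) < x ∧
      ∀ k, i ≤ k → k < sbScanUp a x i f → sbGet a k < x := by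
  induction f generalizing i with
  | zero => omega
  | succ f ih =>
    rw [sbScanUp]
    by_cases h : PySem.List.pyGetD a i 0 < x
    · rw [if_pos h]
      have hip' : i + 1 ≤ p := by
        rcases lt_or_eq_of_le hip with h' | h'
        · omega
        · exact absurd (h' ▸ h) hp
      obtain ⟨h1, h2, h3, h4⟩ := ih (i+1) hip' (by omega)
      refine ⟨by omega, h2, h3, fun k hk1 hk2 => ?_⟩
      rcases lt_or_eq_of_le hk1 with h' | h'
      · exact h4 k (by omega) hk2
      · exact h' ▸ h
    · rw [if_neg h]
      exact ⟨le_refl _, hip, h, fun k hk1 hk2 => by omega⟩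

lemma sbScanDown_spec (a : List Int) (x : Int) (j q : Int) (f : Nat)
    (hqj : q ≤ j) (hq : ¬ x < sbGet a q) (hf : (j - q).toNat < f) :
    sbScanDown a x j f ≤ j ∧ q ≤ sbScanDown a x j f ∧ ¬ x < sbGet a (sbScanDown a x j f) ∧
      ∀ k, sbScanDown a x j f < k → k ≤ j → x < sbGet a k := by
  induction f generalizing j with
  | zero => omega
  | succ f ih =>
    rw [sbScanDown]
    by_cases h : x < PySem.List.pyGetD a j 0
    · rw [if_pos h]
      have hqj' : q ≤ j - 1 := by
        rcases lt_or_eq_of_le hqj with h' | h'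
        · omega
        · exact absurd (h' ▸ h) hq
      obtain ⟨h1, h2, h3, h4⟩ := ih (j-1) hqj' (by omega)
      refine ⟨by omega, h2, h3, fun k hk1 hk2 => ?_⟩
      rcases lt_or_eq_of_le hk2 with h' | h'
      · exact h4 k hk1 (by omega)
      · exact h' ▸ h
    · rw [if_neg h]
      exact ⟨le_refl _, hqj, h, fun k hk1 hk2 => by omega⟩


structure SbInv (a0 : List Int) (x l r : Int) (a : List Int) (i j : Int) : Prop where
  len : a.length = a0.length
  frame : ∀ k : Int, 0 ≤ k → k < (a0.length : Int) → (k < l ∨ r < k) → sbGet a k = sbGet a0 k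
  perm : a.Perm a0
  hli : l < i
  hir : i ≤ r + 1
  hlj : l - 1 ≤ j
  hjr : j < r
  low : ∀ k, l ≤ k → k < i → sbGet a k ≤ x
  high : ∀ k, j < k → k ≤ r → x ≤ sbGet a k
  wit : i ≤ j → (∃ p, i ≤ p ∧ p ≤ r ∧ x ≤ sbGet a p) ∧ (∃ q, l ≤ q ∧ q ≤ j ∧ sbGet a q ≤ x)


lemma sbSwapStep (a0 : List Int) (x l r : Int) (h0 : 0 ≤ l) (hr : r < (a0.length : Int))
    (a : List Int) (i j i' j' : Int)
    (len : a.length = a0.length) (frame : ∀ k : Int, 0 ≤ k → k < (a0.length : Int) → (k < l ∨ r < k) → sbGet a k = sbGet a0 k)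
    (perm : a.Perm a0)
    (hli : l ≤ i) (hjr : j ≤ r)
    (low : ∀ k, l ≤ k → k < i → sbGet a k ≤ x)
    (high : ∀ k, j < k → k ≤ r → x ≤ sbGet a k)
    (u1 : i ≤ i') (hs : i' ≤ j') (d1 : j' ≤ j)
    (u3 : ¬ sbGet a i' < x) (d3 : ¬ x < sbGet a j')
    (u4 : ∀ k, i ≤ k → k < i' → sbGet a k < x)
    (d4 : ∀ k, j' < k → k ≤ j → x < sbGet a k)
    (hi'r : i' ≤ r) (hlj' : l ≤ j') :
    SbInv a0 x l r (sbSwap a i' j') (i' + 1) (j' - 1) := by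
  have hlen : (a.length : Int) = (a0.length : Int) := by exact_mod_cast len
  have h0i' : (0:Int) ≤ i' := by omega
  have h0j' : (0:Int) ≤ j' := by omega
  have hi'len : i' < (a.length : Int) := by omega
  have hj'len : j' < (a.length : Int) := by omega
  have hswlen : (sbSwap a i' j').length = a.length := length_sbSwap a i' j'
  refine ⟨by rw [hswlen]; exact len, ?_, (sbSwap_perm a i' j' h0i' h0j' hi'len hj'len).trans perm,
    by omega, by omega, by omega, by omega, ?_, ?_, ?_⟩
  · intro k hk0 hklen hkout
    rw [sbSwap_get_ne a i' j' k hk0 (by omega) (by omega) (by omega) h0i' h0j']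
    exact frame k hk0 hklen hkout
  · intro k hkl hki
    by_cases hke : k = i'
    · rw [hke, sbSwap_get_i a i' j' h0i' hs hj'len]; omega
    · rw [sbSwap_get_ne a i' j' k (by omega) (by omega) hke (by omega) h0i' h0j']
      by_cases hki2 : k < i
      · exact low k hkl hki2
      · exact le_of_lt (u4 k (by omega) (by omega))
  · intro k hkj hkr
    by_cases hke : k = j'
    · rw [hke, sbSwap_get_j a i' j' h0i' hs hj'len]; omega
    · rw [sbSwap_get_ne a i' j' k (by omega) (by omega) (by omega) hke h0i' h0j']
      by_cases hkj2 : j < k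
      · exact high k hkj2 hkr
      · exact le_of_lt (d4 k (by omega) (by omega))
  · intro hnext
    constructor
    · exact ⟨j', by omega, by omega, by rw [sbSwap_get_j a i' j' h0i' hs hj'len]; omega⟩
    · exact ⟨i', by omega, by omega, by rw [sbSwap_get_i a i' j' h0i' hs hj'len]; omega⟩

lemma sbLoop_spec (a0 : List Int) (x l r : Int) (h0 : 0 ≤ l) (hr : r < (a0.length : Int)) :
    ∀ (f : Nat) (a : List Int) (i j : Int), SbInv a0 x l r a i j →
      (j - i).toNat + 2 ≤ f →
      SbInv a0 x l r (sbLoop a x i j f).1 (sbLoop a x i j f).2.1 (sbLoop a x i j f).2.2 ∧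
        (sbLoop a x i j f).2.2 < (sbLoop a x i j f).2.1 := by
  intro f
  induction f with
  | zero => intro a i j inv hf; omega
  | succ f ih =>
    intro a i j inv hf
    rw [sbLoop]
    by_cases hij : i ≤ j
    · rw [if_pos hij]
      obtain ⟨⟨p, hp1, hp2, hpx⟩, ⟨q, hq1, hq2, hqx⟩⟩ := inv.wit hij
      have hbli := inv.hli
      have hbir := inv.hir
      have hblj := inv.hlj
      have hbjr := inv.hjr
      have hlen : (a.length : Int) = (a0.length : Int) := by exact_mod_cast inv.len
      obtain ⟨u1, u2, u3, u4⟩ := sbScanUp_spec a x i p (a.length + 1) hp1 (not_lt.mpr hpx) (by omega)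
      obtain ⟨d1, d2, d3, d4⟩ := sbScanDown_spec a x j q (a.length + 1) hq2 (not_lt.mpr hqx) (by omega)
      set i' := sbScanUp a x i (a.length + 1) with hi'def
      set j' := sbScanDown a x j (a.length + 1) with hj'def
      have hbi' : l < i' ∧ i' ≤ r := ⟨by have := inv.hli; omega, by omega⟩
      have hbj' : l ≤ j' ∧ j' < r := ⟨by omega, by have := inv.hjr; omega⟩
      by_cases hs : i' ≤ j'
      · rw [if_pos hs]
        have h0i' : (0:Int) ≤ i' := by omega
        have h0j' : (0:Int) ≤ j' := by omega
        have hi'len : i' < (a.length : Int) := by omega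
        have hj'len : j' < (a.length : Int) := by omega
        have hswlen : (sbSwap a i' j').length = a.length := length_sbSwap a i' j'
        have invNew : SbInv a0 x l r (sbSwap a i' j') (i' + 1) (j' - 1) :=
          sbSwapStep a0 x l r h0 hr a i j i' j' inv.len inv.frame inv.perm
            (by omega) (by omega) inv.low inv.high u1 hs d1 u3 d3 u4 d4 (by omega) (by omega)
        by_cases hrec : i' + 1 ≤ j' - 1
        · exact ih (sbSwap a i' j') (i' + 1) (j' - 1) invNew (by omega)
        · match f, hf with
          | f'' + 1, _ =>
            rw [sbLoop, if_neg hrec]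
            show SbInv a0 x l r (sbSwap a i' j') (i' + 1) (j' - 1) ∧ j' - 1 < i' + 1
            exact ⟨invNew, by omega⟩
      · rw [if_neg hs]
        show SbInv a0 x l r a i' j' ∧ j' < i'
        refine ⟨⟨inv.len, inv.frame, inv.perm, by omega, by omega, by omega, by omega, ?_, ?_, ?_⟩, by omega⟩
        · intro k hkl hki
          by_cases hki2 : k < i
          · exact inv.low k hkl hki2
          · exact le_of_lt (u4 k (by omega) (by omega))
        · intro k hkj hkr
          by_cases hkj2 : j < k
          · exact inv.high k hkj2 hkr
          · exact le_of_lt (d4 k (by omega) (by omega))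
        · intro h; omega
    · rw [if_neg hij]
      show SbInv a0 x l r a i j ∧ j < i
      exact ⟨inv, by omega⟩

lemma sbPartition_spec (a : List Int) (l r : Int) (h0 : 0 ≤ l) (hlr : l ≤ r) (hr : r < (a.length : Int))
    (f : Nat) (hf : (r - l).toNat + 3 ≤ f) :
    SbInv a (sbGet a (PySem.Int.floordiv (l + r) 2)) l r
        (sbLoop a (sbGet a (PySem.Int.floordiv (l + r) 2)) l r f).1
        (sbLoop a (sbGet a (PySem.Int.floordiv (l + r) 2)) l r f).2.1
        (sbLoop a (sbGet a (PySem.Int.floordiv (l + r) 2)) l r f).2.2 ∧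
      (sbLoop a (sbGet a (PySem.Int.floordiv (l + r) 2)) l r f).2.2
        < (sbLoop a (sbGet a (PySem.Int.floordiv (l + r) 2)) l r f).2.1 := by
  obtain ⟨hm1, hm2⟩ := PySem.Int.floordiv_two_mid_bounds hlr
  set mid := PySem.Int.floordiv (l + r) 2 with hmid
  set x := sbGet a mid with hx
  match f, hf with
  | f' + 1, hf =>
    rw [sbLoop, if_pos hlr]
    obtain ⟨u1, u2, u3, u4⟩ := sbScanUp_spec a x l mid (a.length + 1) hm1 (not_lt.mpr (le_refl x)) (by omega)
    obtain ⟨d1, d2, d3, d4⟩ := sbScanDown_spec a x r mid (a.length + 1) hm2 (not_lt.mpr (le_refl x)) (by omega)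
    set i' := sbScanUp a x l (a.length + 1) with hi'def
    set j' := sbScanDown a x r (a.length + 1) with hj'def
    have hs : i' ≤ j' := by omega
    rw [if_pos hs]
    have invNew : SbInv a x l r (sbSwap a i' j') (i' + 1) (j' - 1) :=
      sbSwapStep a x l r h0 hr a l r i' j' rfl (fun k _ _ _ => rfl) (List.Perm.refl a)
        (le_refl l) (le_refl r) (fun k h1 h2 => by omega) (fun k h1 h2 => by omega)
        u1 hs d1 u3 d3 u4 d4 (by omega) (by omega)
    exact sbLoop_spec a x l r h0 hr f' (sbSwap a i' j') (i' + 1) (j' - 1) invNew (by omega)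


def sbSorted (xs : List Int) : List Int := PySem.List.sorted xs (fun y => y) false

lemma sbGet_natCast (a : List Int) (k : Nat) (h : k < a.length) : sbGet a (k : Int) = a[k] := by
  simp [sbGet, List.getD_eq_getElem?_getD, List.getElem?_eq_getElem h]

lemma sbPairwise_short (xs : List Int) (h : xs.length ≤ 1) : xs.Pairwise (· ≤ ·) := by
  match xs with
  | [] => exact List.Pairwise.nil
  | [x] => exact List.pairwise_singleton _ _
  | x :: y :: t => simp at h

lemma sbSplit3 (a : List Int) (u w : Nat) (huw : u ≤ w) :
    a = a.take u ++ (a.drop u).take (w - u) ++ a.drop w := by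
  conv_lhs => rw [← List.take_append_drop u a]
  rw [List.append_assoc]
  congr 1
  conv_lhs => rw [← List.take_append_drop (w - u) (a.drop u)]
  rw [List.drop_drop]
  congr 2
  omega

lemma sbTakeSplit (a : List Int) (u v w : Nat) (h1 : u ≤ v) (h2 : v ≤ w) :
    (a.drop u).take (w - u) = (a.drop u).take (v - u) ++ (a.drop v).take (w - v) := by
  rw [show w - u = (v - u) + (w - v) by omega, List.take_add, List.drop_drop]
  congr 3
  omega

lemma sbTake_eq (a b : List Int) (hl : b.length = a.length) (m : Nat)
    (h : ∀ k : Int, 0 ≤ k → k < (a.length : Int) → k < (m : Int) → sbGet b k = sbGet a k) :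
    b.take m = a.take m := by
  apply List.ext_getElem (by simp [hl])
  intro k hk1 hk2
  have hka : k < a.length := by simp at hk2; omega
  have hkb : k < b.length := by omega
  have hkm : k < m := by simp at hk1; omega
  rw [List.getElem_take, List.getElem_take]
  have := h (k : Int) (by omega) (by exact_mod_cast hka) (by exact_mod_cast hkm)
  rwa [sbGet_natCast b k hkb, sbGet_natCast a k hka] at this

lemma sbDrop_eq (a b : List Int) (hl : b.length = a.length) (m : Nat)
    (h : ∀ k : Int, 0 ≤ k → k < (a.length : Int) → (m : Int) ≤ k → sbGet b k = sbGet a k) :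
    b.drop m = a.drop m := by
  apply List.ext_getElem (by simp [hl])
  intro k hk1 hk2
  have hka : m + k < a.length := by simp at hk2; omega
  have hkb : m + k < b.length := by omega
  rw [List.getElem_drop, List.getElem_drop]
  have := h ((m + k : Nat) : Int) (by omega) (by exact_mod_cast hka) (by push_cast; omega)
  rwa [sbGet_natCast b _ hkb, sbGet_natCast a _ hka] at this

lemma sbSeg_mem (a : List Int) (u v : Nat) (y : Int) (hy : y ∈ (a.drop u).take v) :
    ∃ k : Nat, u ≤ k ∧ k < u + v ∧ k < a.length ∧ y = sbGet a (k : Int) := by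
  obtain ⟨k, hk, hval⟩ := List.mem_iff_getElem.mp hy
  have hk' : k < v ∧ u + k < a.length := by
    have := hk
    simp at this
    omega
  refine ⟨u + k, by omega, by omega, hk'.2, ?_⟩
  rw [sbGet_natCast a _ hk'.2, ← hval, List.getElem_take, List.getElem_drop]

theorem sbSort_spec (fuel : Nat) : ∀ (a : List Int) (l r : Nat), l ≤ r → r < a.length →
    (r - l) < fuel →
    sbSort a (l : Int) (r : Int) fuel =
      a.take l ++ sbSorted ((a.drop l).take (r + 1 - l)) ++ a.drop (r + 1) := by
  induction fuel with
  | zero => intro a l r h1 h2 h3; omega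
  | succ f ih =>
    intro a l r hlr hr hf
    have hrlen : (r : Int) < (a.length : Int) := by exact_mod_cast hr
    obtain ⟨inv, hJI⟩ := sbPartition_spec a l r (by positivity) (by exact_mod_cast hlr) hrlen
      (a.length + 2) (by omega)
    rw [sbSort]
    rw [show PySem.List.pyGetD a (PySem.Int.floordiv ((l : Int) + (r : Int)) 2) 0
        = sbGet a (PySem.Int.floordiv ((l : Int) + (r : Int)) 2) from rfl]
    set X := sbGet a (PySem.Int.floordiv ((l : Int) + (r : Int)) 2) with hX
    set T := sbLoop a X (l : Int) (r : Int) (a.length + 2) with hT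
    set a1 := T.1 with ha1
    set I := T.2.1 with hI
    set J := T.2.2 with hJ
    have len1 : a1.length = a.length := inv.len
    have hlI : (l : Int) < I := inv.hli
    have hIr : I ≤ (r : Int) + 1 := inv.hir
    have hlJ : (l : Int) - 1 ≤ J := inv.hlj
    have hJr : J < (r : Int) := inv.hjr
    -- Nat shadows of the partition indices
    have hjp : ((J + 1).toNat : Int) = J + 1 := Int.toNat_of_nonneg (by omega)
    have hii : (I.toNat : Int) = I := Int.toNat_of_nonneg (by omega)
    set jp := (J + 1).toNat with hjpdef
    set ii := I.toNat with hiidef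
    have hb1 : l ≤ jp ∧ jp ≤ r ∧ jp ≤ ii ∧ l < ii ∧ ii ≤ r + 1 := by omega
    -- the untouched prefix and suffix
    have F1 : a1.take l = a.take l := by
      refine sbTake_eq a a1 len1 l ?_
      intro k hk0 hklen hkl
      exact inv.frame k hk0 hklen (Or.inl hkl)
    have F2 : a1.drop (r+1) = a.drop (r+1) := by
      refine sbDrop_eq a a1 len1 (r+1) ?_
      intro k hk0 hklen hkr
      refine inv.frame k hk0 hklen (Or.inr (by push_cast at hkr; omega))
    have F3 : ((a1.drop l).take (r + 1 - l)).Perm ((a.drop l).take (r + 1 - l)) := by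
      have hd1 := sbSplit3 a1 l (r+1) (by omega)
      have hd2 := sbSplit3 a l (r+1) (by omega)
      have hp := inv.perm
      rw [hd1, hd2, F1, F2] at hp
      rw [List.append_assoc, List.append_assoc, List.perm_append_left_iff] at hp
      exact (List.perm_append_right_iff _).mp hp
    -- first recursive call: sorts [l, J]
    have step1 : ∃ m1 : List Int,
        (if (l : Int) < J then sbSort a1 (l : Int) J f else a1) = a1.take l ++ m1 ++ a1.drop jp ∧
        m1.Perm ((a1.drop l).take (jp - l)) ∧ m1.Pairwise (· ≤ ·) := by
      by_cases hc : (l : Int) < J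
      · rw [if_pos hc]
        rw [show J = ((jp - 1 : Nat) : Int) by omega]
        rw [ih a1 l (jp - 1) (by omega) (by omega) (by omega)]
        rw [show jp - 1 + 1 = jp by omega]
        exact ⟨sbSorted ((a1.drop l).take (jp - l)), rfl,
          PySem.List.sorted_perm _ _ _, PySem.List.sorted_pairwise _ _⟩
      · rw [if_neg hc]
        refine ⟨(a1.drop l).take (jp - l), sbSplit3 a1 l jp (by omega), List.Perm.refl _,
          sbPairwise_short _ (by simp; omega)⟩
    obtain ⟨m1, hm1eq, hm1perm, hm1pw⟩ := step1
    have hm1len : m1.length = jp - l := by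
      rw [hm1perm.length_eq]
      simp
      omega
    rw [hm1eq]
    set A2 := a1.take l ++ m1 ++ a1.drop jp with hA2
    have hA2len : A2.length = a.length := by
      simp [hA2, hm1len]
      omega
    have hXlen : (a1.take l ++ m1).length = jp := by
      simp [hm1len]
      omega
    set midl := (a1.drop jp).take (ii - jp) with hmidl
    have G1 : A2.take ii = a1.take l ++ m1 ++ midl := by
      rw [hA2, List.append_assoc, show ii = (a1.take l).length + (m1.length + (ii - jp)) by
        simp [hm1len]; omega, List.take_length_add_append, List.take_length_add_append]
      rw [← List.append_assoc]
    have G2 : A2.drop ii = a1.drop ii := by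
      have hiieq : ii = (a1.take l).length + (m1.length + (ii - jp)) := by simp [hm1len]; omega
      conv_lhs => rw [hA2, List.append_assoc, hiieq]
      rw [List.drop_length_add_append, List.drop_length_add_append, List.drop_drop]
      congr 1
      omega
    have G4 : A2.drop (r+1) = a1.drop (r+1) := by
      rw [show r + 1 = ii + (r + 1 - ii) by omega, ← List.drop_drop, ← List.drop_drop, G2]
    -- second recursive call: sorts [I, r]
    have step2 : ∃ m2 : List Int,
        (if I < (r : Int) then sbSort A2 I (r : Int) f else A2) = A2.take ii ++ m2 ++ A2.drop (r+1) ∧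
        m2.Perm ((a1.drop ii).take (r + 1 - ii)) ∧ m2.Pairwise (· ≤ ·) := by
      by_cases hc : I < (r : Int)
      · rw [if_pos hc]
        rw [show I = (ii : Int) from hii.symm]
        rw [ih A2 ii r (by omega) (by omega) (by omega)]
        refine ⟨sbSorted ((A2.drop ii).take (r + 1 - ii)), rfl, ?_, PySem.List.sorted_pairwise _ _⟩
        rw [G2] at *
        exact PySem.List.sorted_perm _ _ _
      · rw [if_neg hc]
        refine ⟨(A2.drop ii).take (r + 1 - ii), sbSplit3 A2 ii (r+1) (by omega), ?_,
          sbPairwise_short _ (by simp; omega)⟩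
        rw [G2]
    obtain ⟨m2, hm2eq, hm2perm, hm2pw⟩ := step2
    rw [hm2eq, G1, G4, F2]
    -- element bounds
    have e1 : ∀ y ∈ m1, y ≤ X := by
      intro y hy
      obtain ⟨k, hk1, hk2, hk3, rfl⟩ := sbSeg_mem a1 l (jp - l) y (hm1perm.mem_iff.mp hy)
      exact inv.low (k : Int) (by exact_mod_cast hk1) (by omega)
    have e2 : ∀ y ∈ midl, y = X := by
      intro y hy
      obtain ⟨k, hk1, hk2, hk3, rfl⟩ := sbSeg_mem a1 jp (ii - jp) y hy
      have hlo := inv.low (k : Int) (by omega) (by omega)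
      have hhi := inv.high (k : Int) (by omega) (by omega)
      omega
    have e3 : ∀ y ∈ m2, X ≤ y := by
      intro y hy
      obtain ⟨k, hk1, hk2, hk3, rfl⟩ := sbSeg_mem a1 ii (r + 1 - ii) y (hm2perm.mem_iff.mp hy)
      exact inv.high (k : Int) (by omega) (by omega)
    -- the concatenation is the sorted segment
    have hsorted : sbSorted ((a.drop l).take (r + 1 - l)) = m1 ++ midl ++ m2 := by
      apply PySem.List.sorted_id_eq_of_perm_of_pairwise
      · -- permutation
        refine List.Perm.trans ?_ F3
        rw [sbTakeSplit a1 l jp (r+1) (by omega) (by omega),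
            sbTakeSplit a1 jp ii (r+1) (by omega) (by omega)]
        rw [← List.append_assoc]
        exact ((hm1perm.append (List.Perm.refl midl)).append hm2perm)
      · -- pairwise
        rw [List.append_assoc]
        refine (List.pairwise_append).mpr ⟨hm1pw, (List.pairwise_append).mpr
          ⟨List.pairwise_of_forall_mem_list ?_, hm2pw, ?_⟩, ?_⟩
        · intro u hu v hv
          rw [e2 u hu, e2 v hv]
        · intro u hu v hv
          rw [e2 u hu]
          exact e3 v hv
        · intro u hu v hv
          rcases List.mem_append.mp hv with hv | hv
          · rw [e2 v hv]; exact e1 u hu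
          · exact le_trans (e1 u hu) (e3 v hv)
    rw [hsorted, F1]
    simp only [List.append_assoc]


lemma sbSort_gt (a : List Int) (l r : Int) (h : r < l) (f : Nat) :
    sbSort a l r (f + 1) = a := by
  have hloop : ∀ x : Int, sbLoop a x l r (a.length + 2) = (a, l, r) := by
    intro x
    rw [show a.length + 2 = (a.length + 1) + 1 from rfl, sbLoop, if_neg (by omega)]
  rw [sbSort]
  simp only [hloop]
  rw [if_neg (by omega), if_neg (by omega)]

-- the concatenation of the sorted 8-element chunks among the first t blocks
def sbChunkHead (arr : List Int) (t : Nat) : List Int :=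
  ((List.range t).map (fun s => sbSorted ((arr.drop (8*s)).take 8))).flatten

lemma sbChunkHead_succ (arr : List Int) (t : Nat) :
    sbChunkHead arr (t+1) = sbChunkHead arr t ++ sbSorted ((arr.drop (8*t)).take 8) := by
  unfold sbChunkHead
  rw [List.range_succ, List.map_append, List.flatten_append]
  simp

lemma sbChunkHead_len (arr : List Int) (t : Nat) (h : 8*t ≤ arr.length) :
    (sbChunkHead arr t).length = 8*t := by
  induction t with
  | zero => simp [sbChunkHead]
  | succ t ih =>
    rw [sbChunkHead_succ, List.length_append, ih (by omega)]
    have : (sbSorted ((arr.drop (8*t)).take 8)).length = ((arr.drop (8*t)).take 8).length :=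
      (PySem.List.sorted_perm _ _ _).length_eq
    rw [this]
    simp
    omega

lemma sbLoopFold (arr : List Int) (K : Nat) (h8 : 8*K ≤ arr.length) :
    ∀ t : Nat, t ≤ K →
    (PySem.List.pyRange 0 (t : Int) 1).foldl
      (fun (st : List Int × Int) _ =>
        (sbSort st.1 st.2 (st.2 + 7) (st.1.length + 1), st.2 + 8))
      (arr, 0) = (sbChunkHead arr t ++ arr.drop (8*t), ((8*t : Nat) : Int)) := by
  intro t
  induction t with
  | zero =>
    intro _
    rw [PySem.List.pyRange_one_eq_nil (by omega)]
    simp [sbChunkHead]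
  | succ t ih =>
    intro ht
    rw [show ((t+1 : Nat) : Int) = (t : Int) + 1 by push_cast; ring,
        PySem.List.pyRange_one_succ_right (by omega), List.foldl_append, ih (by omega)]
    simp only [List.foldl_cons, List.foldl_nil]
    have hlen : (sbChunkHead arr t ++ arr.drop (8*t)).length = arr.length := by
      rw [List.length_append, sbChunkHead_len arr t (by omega)]
      simp
      omega
    have hchl : (sbChunkHead arr t).length = 8*t := sbChunkHead_len arr t (by omega)
    have hcast1 : ((8*t : Nat) : Int) + 7 = ((8*t + 7 : Nat) : Int) := by push_cast; ring
    have hsort := sbSort_spec ((sbChunkHead arr t ++ arr.drop (8*t)).length + 1)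
      (sbChunkHead arr t ++ arr.drop (8*t)) (8*t) (8*t+7) (by omega)
      (by rw [hlen]; omega) (by omega)
    rw [hcast1, hsort]
    have e1 : (sbChunkHead arr t ++ arr.drop (8*t)).take (8*t) = sbChunkHead arr t :=
      List.take_left' hchl
    have e2 : (sbChunkHead arr t ++ arr.drop (8*t)).drop (8*t) = arr.drop (8*t) := by
      have := List.drop_length_add_append (l₁ := sbChunkHead arr t) (l₂ := arr.drop (8*t)) 0
      rw [hchl] at this
      simpa using this
    have e3 : (sbChunkHead arr t ++ arr.drop (8*t)).drop (8*t+7+1) = arr.drop (8*(t+1)) := by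
      rw [show 8*t+7+1 = 8*t + 8 by omega, ← List.drop_drop, e2, List.drop_drop]
      congr 1
    rw [e1, e2, e3, Prod.mk.injEq]
    refine ⟨?_, by push_cast; ring⟩
    rw [show 8*t+7+1 - 8*t = 8 by omega, sbChunkHead_succ]

-- ===== B-side lemmas =====

lemma sbInsert_length (x : Int) (b : List Int) : (sbInsert x b).length = b.length + 1 := by
  induction b with
  | nil => rfl
  | cons h t ih =>
    rw [sbInsert]
    split_ifs with hc
    · simp [ih]
    · simp

lemma sbInsert_perm (x : Int) (b : List Int) : (sbInsert x b).Perm (x :: b) := by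
  induction b with
  | nil => exact List.Perm.refl _
  | cons h t ih =>
    rw [sbInsert]
    split_ifs with hc
    · exact (ih.cons h).trans (List.Perm.swap x h t)
    · exact List.Perm.refl _

lemma sbInsert_pairwise (x : Int) (b : List Int) (hb : b.Pairwise (· ≤ ·)) :
    (sbInsert x b).Pairwise (· ≤ ·) := by
  induction b with
  | nil => exact List.pairwise_singleton _ _
  | cons h t ih =>
    rw [sbInsert]
    rw [List.pairwise_cons] at hb
    split_ifs with hc
    · refine List.pairwise_cons.mpr ⟨?_, ih hb.2⟩
      intro y hy
      rcases List.mem_cons.mp ((sbInsert_perm x t).mem_iff.mp hy) with hy' | hy'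
      · omega
      · exact hb.1 y hy'
    · refine List.pairwise_cons.mpr ⟨?_, List.pairwise_cons.mpr hb⟩
      intro y hy
      rcases List.mem_cons.mp hy with hy' | hy'
      · omega
      · exact le_trans (by omega) (hb.1 y hy')

lemma sbIsort_perm (xs : List Int) : ∀ b : List Int,
    (xs.foldl (fun b x => sbInsert x b) b).Perm (b ++ xs) := by
  induction xs with
  | nil => intro b; simp
  | cons x t ih =>
    intro b
    rw [List.foldl_cons]
    refine (ih (sbInsert x b)).trans ?_
    refine ((sbInsert_perm x b).append_right t).trans ?_
    exact List.perm_middle.symm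

lemma sbIsort_pairwise (xs : List Int) : ∀ b : List Int, b.Pairwise (· ≤ ·) →
    (xs.foldl (fun b x => sbInsert x b) b).Pairwise (· ≤ ·) := by
  induction xs with
  | nil => intro b hb; simpa using hb
  | cons x t ih =>
    intro b hb
    exact ih (sbInsert x b) (sbInsert_pairwise x b hb)

lemma sbIsort_eq_sorted (xs : List Int) :
    xs.foldl (fun b x => sbInsert x b) [] = sbSorted xs := by
  have h1 : (xs.foldl (fun b x => sbInsert x b) []).Perm xs := by
    simpa using sbIsort_perm xs []
  have h2 : (xs.foldl (fun b x => sbInsert x b) []).Pairwise (· ≤ ·) :=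
    sbIsort_pairwise xs [] List.Pairwise.nil
  symm
  apply PySem.List.sorted_id_eq_of_perm_of_pairwise
  · exact h1
  · exact h2

lemma sbFold_noflush (xs : List Int) : ∀ (b out : List Int), b.length + xs.length < 8 →
    xs.foldl sbStep (out, b) = (out, xs.foldl (fun b x => sbInsert x b) b) := by
  induction xs with
  | nil => intro b out _; rfl
  | cons x t ih =>
    intro b out hlt
    simp only [List.length_cons] at hlt
    have hne : ((sbInsert x b).length == 8) = false := by
      rw [sbInsert_length]
      simp
      omega
    simp only [List.foldl_cons]
    rw [show sbStep (out, b) x = (out, sbInsert x b) by simp [sbStep, hne]]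
    exact ih (sbInsert x b) out (by rw [sbInsert_length]; omega)

lemma sbFold_flush (xs : List Int) : ∀ (b out : List Int), b.length + xs.length = 8 → xs ≠ [] →
    xs.foldl sbStep (out, b) = (out ++ xs.foldl (fun b x => sbInsert x b) b, []) := by
  induction xs with
  | nil => intro b out h hne; exact absurd rfl hne
  | cons x t ih =>
    intro b out h _
    simp only [List.foldl_cons]
    cases t with
    | nil =>
      simp only [List.length_cons, List.length_nil] at h
      have h8 : ((sbInsert x b).length == 8) = true := by
        rw [sbInsert_length]
        simp
        omega
      simp [sbStep, h8]
    | cons y s =>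
      simp only [List.length_cons] at h
      have hne : ((sbInsert x b).length == 8) = false := by
        rw [sbInsert_length]
        simp
        omega
      rw [show sbStep (out, b) x = (out, sbInsert x b) by simp [sbStep, hne]]
      exact ih (sbInsert x b) out
        (by rw [sbInsert_length]; simp only [List.length_cons]; omega) (by simp)

lemma sbChunkHead_shift (xs : List Int) (t : Nat) :
    sbChunkHead xs (t+1) = sbSorted (xs.take 8) ++ sbChunkHead (xs.drop 8) t := by
  unfold sbChunkHead
  rw [List.range_succ_eq_map, List.map_cons, List.flatten_cons, List.map_map]
  simp only [Nat.mul_zero, List.drop_zero]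
  congr 1
  congr 1
  apply List.map_congr_left
  intro s _
  have hd : (xs.drop 8).drop (8*s) = xs.drop (8*(s+1)) := by
    rw [List.drop_drop]
    congr 1
    omega
  simp only [Function.comp]
  rw [hd]

lemma sbFold_main : ∀ (n : Nat) (xs : List Int), xs.length ≤ n → ∀ out : List Int,
    xs.foldl sbStep (out, []) =
      (out ++ sbChunkHead xs (xs.length / 8), sbSorted (xs.drop (8 * (xs.length / 8)))) := by
  intro n
  induction n with
  | zero =>
    intro xs hx out
    have hnil : xs = [] := List.eq_nil_of_length_eq_zero (by omega)
    subst hnil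
    simp [sbChunkHead, sbSorted, PySem.List.sorted]
  | succ n ih =>
    intro xs hx out
    by_cases hlt : xs.length < 8
    · rw [sbFold_noflush xs [] out (by simpa using hlt), sbIsort_eq_sorted,
          Nat.div_eq_of_lt hlt]
      simp [sbChunkHead]
    · have h8 : 8 ≤ xs.length := by omega
      have htk : (xs.take 8).length = 8 := by rw [List.length_take]; omega
      have hdk : (xs.drop 8).length = xs.length - 8 := by rw [List.length_drop]
      conv_lhs => rw [← List.take_append_drop 8 xs, List.foldl_append]
      rw [sbFold_flush (xs.take 8) [] out
            (by rw [htk]; rfl)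
            (by intro hc; rw [hc] at htk; simp at htk),
          sbIsort_eq_sorted]
      rw [ih (xs.drop 8) (by omega) (out ++ sbSorted (xs.take 8))]
      have hK : xs.length / 8 = (xs.drop 8).length / 8 + 1 := by
        simp
        omega
      rw [hK, sbChunkHead_shift, List.append_assoc]
      rw [Prod.mk.injEq]
      refine ⟨rfl, ?_⟩
      rw [List.drop_drop]
      congr 1
      simp
      omega

-- the common canonical form both programs reduce to
theorem sort_blocks_eq (arr : List Int) (h : arr ≠ []) : sort_blocks arr = sort_blocks_alt arr := by
  have hn : 0 < arr.length := List.length_pos_of_ne_nil h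
  have hfold := sbFold_main arr.length arr le_rfl []
  simp only [List.nil_append] at hfold
  by_cases hlt : (arr.length : Int) < 8
  · -- len < 8 : both are the sorted copy of arr
    have hlt8 : arr.length < 8 := by exact_mod_cast hlt
    have hA : sort_blocks arr = sbSorted arr := by
      rw [sort_blocks, PySem.List.slice_none_none]
      rw [if_pos hlt]
      rw [show (0:Int) = ((0:Nat):Int) by norm_num,
          show (arr.length : Int) - 1 = ((arr.length - 1 : Nat) : Int) by omega]
      rw [sbSort_spec (arr.length + 1) arr 0 (arr.length - 1) (by omega) (by omega) (by omega)]
      rw [show arr.length - 1 + 1 - 0 = arr.length by omega]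
      simp
      omega
    have hB : sort_blocks_alt arr = sbSorted arr := by
      have hK : arr.length / 8 = 0 := Nat.div_eq_of_lt hlt8
      have hne : sbSorted arr ≠ [] := by
        have hl : (sbSorted arr).length = arr.length :=
          (PySem.List.sorted_perm arr (fun y => y) false).length_eq
        intro hc
        rw [hc] at hl
        simp at hl
        omega
      simp only [sort_blocks_alt, hfold, hK]
      simp [sbChunkHead, hne]
    rw [hA, hB]
  · -- len >= 8
    have h8 : 8 ≤ arr.length := by omega
    set K := arr.length / 8 with hKdef
    have hKle : 8 * K ≤ arr.length := by omega
    have hchl : (sbChunkHead arr K).length = 8*K := sbChunkHead_len arr K hKle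
    have hfoldA := sbLoopFold arr K hKle K le_rfl
    have hk : PySem.Int.floordiv (arr.length : Int) 8 = ((K : Nat) : Int) := by
      rw [hKdef]
      exact_mod_cast PySem.Int.floordiv_natCast arr.length 8
    have hmod : PySem.Int.mod (arr.length : Int) 8 = ((arr.length % 8 : Nat) : Int) := by
      exact_mod_cast PySem.Int.mod_natCast arr.length 8
    rw [sort_blocks, PySem.List.slice_none_none]
    rw [if_neg hlt]
    simp only [hk, hmod, hfoldA]
    set cK := sbChunkHead arr K ++ arr.drop (8*K) with hcK
    have hcKlen : cK.length = arr.length := by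
      rw [hcK, List.length_append, hchl]
      simp
      omega
    by_cases hm0 : arr.length % 8 = 0
    · -- remainder 0
      have h8K : 8*K = arr.length := by omega
      have hdrop : arr.drop (8*K) = [] := by rw [h8K, List.drop_length]
      rw [sbSort_gt cK _ _ (by omega) cK.length]
      rw [if_pos (by simp; omega)]
      have hB : sort_blocks_alt arr = sbChunkHead arr K := by
        simp only [sort_blocks_alt, hfold, hdrop]
        simp [sbSorted, PySem.List.sorted]
      rw [hB, hcK, hdrop, List.append_nil]
    · -- remainder > 0
      have hrem : 0 < arr.length % 8 := by omega
      have h8K : 8*K < arr.length := by omega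
      rw [show (arr.length : Int) - 1 = ((arr.length - 1 : Nat) : Int) by omega]
      rw [sbSort_spec (cK.length + 1) cK (8*K) (arr.length - 1) (by omega) (by omega) (by omega)]
      have E1 : cK.take (8*K) = sbChunkHead arr K := List.take_left' hchl
      have E2 : cK.drop (8*K) = arr.drop (8*K) := by
        have := List.drop_length_add_append (l₁ := sbChunkHead arr K) (l₂ := arr.drop (8*K)) 0
        rw [hchl] at this
        simpa using this
      have E3 : cK.drop (arr.length - 1 + 1) = [] := by
        rw [show arr.length - 1 + 1 = cK.length by omega, List.drop_length]
      rw [E1, E2, E3, List.append_nil]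
      rw [show arr.length - 1 + 1 - 8*K = (arr.drop (8*K)).length by simp; omega, List.take_length]
      rw [if_neg (by simp; omega)]
      set S := sbSorted (arr.drop (8*K)) with hS
      have hSlen : S.length = arr.length % 8 := by
        have hl : (sbSorted (arr.drop (8*K))).length = (arr.drop (8*K)).length :=
          (PySem.List.sorted_perm _ _ _).length_eq
        rw [hS, hl, List.length_drop]
        omega
      have hSne : S ≠ [] := by
        intro hc
        rw [hc] at hSlen
        simp at hSlen
        omega
      have hCne : sbChunkHead arr K ≠ [] := by
        intro hc
        rw [hc] at hchl
        simp at hchl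
        omega
      have hB : sort_blocks_alt arr
          = sbChunkHead arr K ++ List.replicate (8 - S.length) 0 ++ S := by
        simp only [sort_blocks_alt, hfold]
        simp [hSne, hCne]
      rw [hB]
      rw [PySem.List.slice_zero_start, PySem.List.slice_to_natCast, PySem.List.slice_from_natCast]
      rw [List.take_left' hchl]
      have hdropS : (sbChunkHead arr K ++ S).drop (8*K) = S := by
        have := List.drop_length_add_append (l₁ := sbChunkHead arr K) (l₂ := S) 0
        rw [hchl] at this
        simpa using this
      rw [hdropS]
      rw [show (8 - ((arr.length : Int) - ((8*K : Nat) : Int))).toNat = 8 - S.length by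
        rw [hSlen]; omega]


-- ===== VERDICT (by name: the statement is the Claim_ definition above) =====
theorem sort_blocks_spec : Claim_equal_sort_blocks := by
  intro arr _ hpre
  exact sort_blocks_eq arr hpre
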